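-- pv_equiv track=rewrite | github.com/ForBloodB/SiliconTrace | backend/analyze_rt_drc.py | combine_max
-- ===== SOURCE A (Python) =====
-- def combine_max(matrices: list[list[list[int]]]) -> list[list[int]]:
--     if not matrices:
--         return []
--     rows = max(len(matrix) for matrix in matrices)
--     cols = max((len(row) for matrix in matrices for row in matrix), default=0)
--     combined = [[0 for _ in range(cols)] for _ in range(rows)]
--     for matrix in matrices:
--         for row_idx, row in enumerate(matrix):
--             for col_idx, value in enumerate(row):
--                 if value > combined[row_idx][col_idx]:
--                     combined[row_idx][col_idx] = value
--     return combined
-- ===== SOURCE B (Python) =====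
-- def combine_max(matrices: list[list[list[int]]]) -> list[list[int]]:
--     if not matrices:
--         return []
--     rows = max(len(matrix) for matrix in matrices)
--     cols = max((len(row) for matrix in matrices for row in matrix), default=0)
--     return [
--         [
--             max([0] + [m[r][c] for m in matrices if r < len(m) and c < len(m[r])])
--             for c in range(cols)
--         ]
--         for r in range(rows)
--     ]
-- ===== Notes on version B (the rewrite author's own statement) =====
-- stated objective: alternative
-- what changed: B finalizes each output cell in one gather pass over the matrices (per-cell max including 0) instead of A's in-place scatter updates matrix-by-matrix into a mutable grid.
import Mathlib
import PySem

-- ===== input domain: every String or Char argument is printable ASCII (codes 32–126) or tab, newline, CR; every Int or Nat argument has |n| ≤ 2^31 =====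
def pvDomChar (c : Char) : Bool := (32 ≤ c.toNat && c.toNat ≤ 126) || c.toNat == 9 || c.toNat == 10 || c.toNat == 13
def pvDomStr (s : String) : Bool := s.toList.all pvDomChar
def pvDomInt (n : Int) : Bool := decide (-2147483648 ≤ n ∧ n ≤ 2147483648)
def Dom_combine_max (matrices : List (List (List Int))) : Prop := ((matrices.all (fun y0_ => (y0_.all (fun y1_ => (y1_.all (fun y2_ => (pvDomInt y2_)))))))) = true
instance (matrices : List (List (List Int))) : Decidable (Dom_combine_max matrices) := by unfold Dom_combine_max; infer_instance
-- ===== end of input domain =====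

-- B re-derives each output cell by a single gather pass (per-cell max with 0) instead of A's
-- in-place scatter updates; same cost class, different decomposition ("alternative").

-- ===== PORT A =====
-- inner loop: `for col_idx, value in enumerate(row)` with the in-place update (index-carrying recursion)
def cmInner (ri : Nat) (ci : Nat) (row : List Int) (g : List (List Int)) : List (List Int) :=
  match row with
  | [] => g
  | v :: rest =>
    cmInner ri (ci+1) rest
      (if (g.getD ri []).getD ci 0 < v then g.set ri ((g.getD ri []).set ci v) else g)

-- middle loop: `for row_idx, row in enumerate(matrix)`
def cmRows (ri : Nat) (matrix : List (List Int)) (g : List (List Int)) : List (List Int) :=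
  match matrix with
  | [] => g
  | row :: rest => cmRows (ri+1) rest (cmInner ri 0 row g)

-- rows = max(len(matrix) for matrix in matrices)  (running-max loop; the list is nonempty and lengths are ≥ 0)
def pyRowsOf (matrices : List (List (List Int))) : Nat :=
  matrices.foldl (fun acc m => max acc m.length) 0

-- cols = max((len(row) for matrix in matrices for row in matrix), default=0)
def pyColsOf (matrices : List (List (List Int))) : Nat :=
  matrices.foldl (fun acc m => m.foldl (fun acc2 row => max acc2 row.length) acc) 0

def combine_max (matrices : List (List (List Int))) : List (List Int) :=
  if matrices = [] then []
  else
    matrices.foldl (fun g m => cmRows 0 m g)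
      ((List.range (pyRowsOf matrices)).map (fun _ => (List.range (pyColsOf matrices)).map (fun _ => (0:Int))))

-- ===== PORT B =====
def combine_max_alt (matrices : List (List (List Int))) : List (List Int) :=
  if matrices = [] then []
  else
    (List.range (pyRowsOf matrices)).map (fun r =>
      (List.range (pyColsOf matrices)).map (fun c =>
        -- max([0] + [m[r][c] for m in matrices if r < len(m) and c < len(m[r])])
        ((matrices.filterMap (fun m =>
            if r < m.length ∧ c < (m.getD r []).length
            then some ((m.getD r []).getD c 0) else none)).foldl max 0)))

-- ===== PRECONDITION & SPEC =====
def Spec_combine_max (matrices : List (List (List Int))) (out : List (List Int)) : Prop := out = combine_max_alt matrices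
instance (matrices : List (List (List Int))) (out : List (List Int)) : Decidable (Spec_combine_max matrices out) := by unfold Spec_combine_max; infer_instance

-- ===== CLAIM (what is proved, stated in full; the proofs are below) =====
def Claim_equal_combine_max : Prop := ∀ (matrices : List (List (List Int))), Dom_combine_max matrices → Spec_combine_max matrices (combine_max matrices)

-- ===== LEMMAS AND PROOFS =====

-- the value A's grid holds at (a,b) (0 when out of range, matching the untouched-zero reading)
def cell (g : List (List Int)) (a b : Nat) : Int := (g.getD a []).getD b 0

theorem getD_set_len (l : List (List Int)) (i : Nat) (x : List Int) (a : Nat) :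
    ((l.set i x).getD a []).length = if a = i ∧ i < l.length then x.length else ((l.getD a []).length) := by
  simp [List.getD_eq_getElem?_getD, List.getElem?_set]
  split_ifs with h1 h2 <;> simp_all

theorem cmInner_rowlen (ri : Nat) (row : List Int) : ∀ (ci : Nat) (g : List (List Int)) (a : Nat),
    ((cmInner ri ci row g).getD a []).length = (g.getD a []).length := by
  induction row with
  | nil => intro ci g a; rfl
  | cons v rest ih =>
    intro ci g a
    simp only [cmInner]
    rw [ih]
    split_ifs with h
    · rw [getD_set_len]
      split_ifs with h2
      · simp [h2.1]
      · rfl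
    · rfl

theorem cmInner_len (ri : Nat) (row : List Int) : ∀ (ci : Nat) (g : List (List Int)),
    (cmInner ri ci row g).length = g.length := by
  induction row with
  | nil => intro ci g; rfl
  | cons v rest ih =>
    intro ci g
    simp only [cmInner]
    rw [ih]
    split_ifs <;> simp

theorem getD_set' {α : Type} (l : List α) (i : Nat) (x : α) (a : Nat) (d : α) :
    (l.set i x).getD a d = if a = i ∧ i < l.length then x else l.getD a d := by
  simp [List.getD_eq_getElem?_getD, List.getElem?_set]
  split_ifs with h1 h2 <;> simp_all

theorem cmInner_cell (ri : Nat) (row : List Int) (a b : Nat) :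
    ∀ (ci : Nat) (g : List (List Int)), ri < g.length → ci + row.length ≤ (g.getD ri []).length →
    cell (cmInner ri ci row g) a b =
      if a = ri ∧ ci ≤ b ∧ b < ci + row.length then max (cell g a b) (row.getD (b - ci) 0)
      else cell g a b := by
  induction row with
  | nil =>
    intro ci g _ _
    simp only [cmInner]
    rw [if_neg (by rintro ⟨-, h2, h3⟩; simp only [List.length_nil, Nat.add_zero] at h3; omega)]
  | cons v rest ih =>
    intro ci g hri hlen
    simp only [List.length_cons] at hlen
    simp only [cmInner]
    by_cases hv : (g.getD ri []).getD ci 0 < v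
    · rw [if_pos hv]
      have hci : ci < (g.getD ri []).length := by omega
      rw [ih (ci+1) _ (by simpa using hri)
        (by rw [getD_set_len, if_pos ⟨rfl, hri⟩, List.length_set]; omega)]
      have hcell : ∀ b', cell (g.set ri ((g.getD ri []).set ci v)) a b' =
          if a = ri ∧ b' = ci then v else cell g a b' := by
        intro b'
        unfold cell
        rw [getD_set' (d := [])]
        by_cases ha : a = ri
        · rw [if_pos ⟨ha, hri⟩, getD_set']
          by_cases hb' : b' = ci
          · rw [if_pos ⟨hb', hci⟩, if_pos ⟨ha, hb'⟩]
          · rw [if_neg (by simp [hb']), if_neg (by simp [hb']), ha]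
        · rw [if_neg (by simp [ha]), if_neg (by simp [ha])]
      simp only [hcell]
      by_cases ha : a = ri
      · subst ha
        by_cases hb : b = ci
        · subst hb
          rw [if_neg (by rintro ⟨-, h2, -⟩; omega), if_pos (by simp), if_pos ⟨rfl, le_refl _, by simp only [List.length_cons]; omega⟩]
          simp only [Nat.sub_self, List.getD_cons_zero]
          exact (max_eq_right (le_of_lt hv)).symm
        · by_cases hb2 : ci + 1 ≤ b ∧ b < ci + 1 + rest.length
          · rw [if_pos ⟨rfl, hb2.1, hb2.2⟩, if_neg (by simp [hb]),
              if_pos ⟨rfl, by omega, by simp only [List.length_cons]; omega⟩]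
            have : b - ci = (b - (ci + 1)) + 1 := by omega
            rw [this, List.getD_cons_succ]
          · rw [if_neg (by intro h; exact hb2 ⟨h.2.1, h.2.2⟩), if_neg (by simp [hb]),
              if_neg (by rintro ⟨-, h2, h3⟩; simp only [List.length_cons] at h3; exact hb2 ⟨by omega, by omega⟩)]
      · rw [if_neg (by simp [ha]), if_neg (by simp [ha]), if_neg (by simp [ha])]
    · rw [if_neg hv]
      rw [ih (ci+1) _ hri (by omega)]
      by_cases ha : a = ri
      · subst ha
        by_cases hb : b = ci
        · subst hb
          rw [if_neg (by rintro ⟨-, h2, -⟩; omega), if_pos ⟨rfl, le_refl _, by simp only [List.length_cons]; omega⟩]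
          simp only [Nat.sub_self, List.getD_cons_zero]
          unfold cell
          exact (max_eq_left (le_of_not_gt hv)).symm
        · by_cases hb2 : ci + 1 ≤ b ∧ b < ci + 1 + rest.length
          · rw [if_pos ⟨rfl, hb2.1, hb2.2⟩, if_pos ⟨rfl, by omega, by simp only [List.length_cons]; omega⟩]
            have : b - ci = (b - (ci + 1)) + 1 := by omega
            rw [this, List.getD_cons_succ]
          · rw [if_neg (by intro h; exact hb2 ⟨h.2.1, h.2.2⟩),
              if_neg (by rintro ⟨-, h2, h3⟩; simp only [List.length_cons] at h3; exact hb2 ⟨by omega, by omega⟩)]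
      · rw [if_neg (by simp [ha]), if_neg (by simp [ha])]

theorem cmRows_rowlen (matrix : List (List Int)) : ∀ (ri : Nat) (g : List (List Int)) (a : Nat),
    ((cmRows ri matrix g).getD a []).length = (g.getD a []).length := by
  induction matrix with
  | nil => intro ri g a; rfl
  | cons row rest ih =>
    intro ri g a
    simp only [cmRows]
    rw [ih, cmInner_rowlen]

theorem cmRows_len (matrix : List (List Int)) : ∀ (ri : Nat) (g : List (List Int)),
    (cmRows ri matrix g).length = g.length := by
  induction matrix with
  | nil => intro ri g; rfl
  | cons row rest ih =>
    intro ri g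
    simp only [cmRows]
    rw [ih, cmInner_len]

theorem cmRows_cell (cols : Nat) (matrix : List (List Int)) (a b : Nat) :
    ∀ (ri : Nat) (g : List (List Int)), ri + matrix.length ≤ g.length →
    (∀ a', (g.getD a' []).length ≤ cols) → (∀ row ∈ matrix, row.length ≤ cols) →
    (∀ a', a' < g.length → cols ≤ (g.getD a' []).length) →
    cell (cmRows ri matrix g) a b =
      if ri ≤ a ∧ a < ri + matrix.length ∧ b < (matrix.getD (a - ri) []).length
      then max (cell g a b) ((matrix.getD (a - ri) []).getD b 0)
      else cell g a b := by
  induction matrix with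
  | nil =>
    intro ri g _ _ _ _
    simp only [cmRows]
    rw [if_neg (by rintro ⟨h5, h6, -⟩; simp only [List.length_nil, Nat.add_zero] at h6; omega)]
  | cons row rest ih =>
    intro ri g h1 h2 h3 h4
    simp only [List.length_cons] at h1
    simp only [cmRows]
    have hg'len : (cmInner ri 0 row g).length = g.length := cmInner_len ri row 0 g
    rw [ih (ri+1) _ (by rw [hg'len]; omega)
        (fun a' => by rw [cmInner_rowlen]; exact h2 a')
        (fun r hr => h3 r (List.mem_cons_of_mem _ hr))
        (fun a' ha' => by rw [cmInner_rowlen]; exact h4 a' (by rwa [hg'len] at ha'))]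
    have hrow : row.length ≤ (g.getD ri []).length :=
      le_trans (h3 row (List.mem_cons_self)) (h4 ri (by omega))
    rw [cmInner_cell ri row a b 0 g (by omega) (by omega)]
    by_cases ha : a = ri
    · rw [if_neg (by rintro ⟨h5, -, -⟩; omega)]
      by_cases hb : b < row.length
      · rw [if_pos ⟨ha, Nat.zero_le _, by omega⟩,
            if_pos ⟨by omega, by simp only [List.length_cons]; omega,
              by rw [show a - ri = 0 by omega]; simpa using hb⟩]
        rw [show a - ri = 0 by omega]
        simp
      · rw [if_neg (by rintro ⟨-, -, h5⟩; omega),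
            if_neg (by
              rintro ⟨-, -, h5⟩
              rw [show a - ri = 0 by omega] at h5
              simp only [List.getD_cons_zero] at h5
              omega)]
    · rw [if_neg (show ¬(a = ri ∧ 0 ≤ b ∧ b < 0 + row.length) by
          rintro ⟨h5, -, -⟩; exact ha h5)]
      have hsub : ri + 1 ≤ a → a - ri = (a - (ri+1)) + 1 := by omega
      by_cases hc : ri + 1 ≤ a ∧ a < ri + 1 + rest.length ∧ b < (rest.getD (a - (ri+1)) []).length
      · rw [if_pos hc, if_pos ⟨by omega, by simp only [List.length_cons]; omega,
              by rw [hsub hc.1, List.getD_cons_succ]; exact hc.2.2⟩]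
        rw [hsub hc.1, List.getD_cons_succ]
      · rw [if_neg hc, if_neg ?_]
        rintro ⟨h5, h6, h7⟩
        apply hc
        simp only [List.length_cons] at h6
        have h5' : ri + 1 ≤ a := by omega
        rw [hsub h5', List.getD_cons_succ] at h7
        exact ⟨h5', by omega, h7⟩

theorem fold_cell (cols a b : Nat) (ms : List (List (List Int))) :
    ∀ g, (∀ m ∈ ms, m.length ≤ g.length) → (∀ m ∈ ms, ∀ row ∈ m, row.length ≤ cols) →
    (∀ a', (g.getD a' []).length ≤ cols) → (∀ a', a' < g.length → cols ≤ (g.getD a' []).length) →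
    cell (ms.foldl (fun g m => cmRows 0 m g) g) a b =
      ms.foldl (fun acc m => if a < m.length ∧ b < (m.getD a []).length
        then max acc ((m.getD a []).getD b 0) else acc) (cell g a b) := by
  induction ms with
  | nil => intro g _ _ _ _; rfl
  | cons m rest ih =>
    intro g h1 h2 h3 h4
    simp only [List.foldl_cons]
    rw [ih (cmRows 0 m g)
      (fun m' hm' => by rw [cmRows_len]; exact h1 m' (List.mem_cons_of_mem _ hm'))
      (fun m' hm' => h2 m' (List.mem_cons_of_mem _ hm'))
      (fun a' => by rw [cmRows_rowlen]; exact h3 a')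
      (fun a' ha' => by rw [cmRows_rowlen]; exact h4 a' (by rwa [cmRows_len] at ha'))]
    rw [cmRows_cell cols m a b 0 g (by simpa using h1 m List.mem_cons_self)
      h3 (h2 m List.mem_cons_self) h4]
    congr 1
    simp only [Nat.zero_add, Nat.sub_zero, Nat.zero_le, true_and]

theorem foldR_len (ms : List (List (List Int))) :
    ∀ g, (ms.foldl (fun g m => cmRows 0 m g) g).length = g.length := by
  induction ms with
  | nil => intro g; rfl
  | cons m rest ih => intro g; simp only [List.foldl_cons]; rw [ih, cmRows_len]

theorem foldR_rowlen (ms : List (List (List Int))) :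
    ∀ g a, ((ms.foldl (fun g m => cmRows 0 m g) g).getD a []).length = (g.getD a []).length := by
  induction ms with
  | nil => intro g a; rfl
  | cons m rest ih => intro g a; simp only [List.foldl_cons]; rw [ih, cmRows_rowlen]

theorem rows_bound (ms : List (List (List Int))) (m : List (List Int)) (hm : m ∈ ms) :
    m.length ≤ pyRowsOf ms :=
  (PySem.List.le_foldl_max_nat ms (fun m => m.length) 0).2 m hm

theorem cols_mono (ms : List (List (List Int))) :
    ∀ init, init ≤ ms.foldl (fun acc m => m.foldl (fun acc2 row => max acc2 row.length) acc) init := by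
  induction ms with
  | nil => intro init; exact le_refl _
  | cons m rest ih =>
    intro init
    exact le_trans (PySem.List.le_foldl_max_nat m (fun r => r.length) init).1 (ih _)

theorem cols_bound_gen (ms : List (List (List Int))) :
    ∀ init, ∀ m ∈ ms, ∀ row ∈ m,
      row.length ≤ ms.foldl (fun acc m => m.foldl (fun acc2 row => max acc2 row.length) acc) init := by
  induction ms with
  | nil => intro init m hm; cases hm
  | cons m rest ih =>
    intro init m' hm' row hrow
    simp only [List.foldl_cons]
    rcases List.mem_cons.mp hm' with h | h
    · subst h
      exact le_trans ((PySem.List.le_foldl_max_nat m' (fun r => r.length) init).2 row hrow)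
        (cols_mono rest _)
    · exact ih _ m' h row hrow

theorem cols_bound (ms : List (List (List Int))) (m : List (List Int)) (hm : m ∈ ms)
    (row : List Int) (hrow : row ∈ m) : row.length ≤ pyColsOf ms :=
  cols_bound_gen ms 0 m hm row hrow

theorem combine_max_spec : Claim_equal_combine_max := by
  unfold Claim_equal_combine_max Spec_combine_max
  intro matrices _
  by_cases hm : matrices = []
  · simp [combine_max, combine_max_alt, hm]
  · unfold combine_max combine_max_alt
    rw [if_neg hm, if_neg hm]
    have hg0row : ∀ a, (((List.range (pyRowsOf matrices)).map
        (fun _ => (List.range (pyColsOf matrices)).map (fun _ => (0:Int)))).getD a []).length =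
        if a < pyRowsOf matrices then pyColsOf matrices else 0 := by
      intro a
      simp only [List.getD_eq_getElem?_getD, List.getElem?_map]
      by_cases h : a < pyRowsOf matrices
      · rw [List.getElem?_range h]
        simp [h]
      · rw [List.getElem?_eq_none (by simpa using Nat.le_of_not_lt h)]
        simp [h]
    have hcell0 : ∀ a b, cell ((List.range (pyRowsOf matrices)).map
        (fun _ => (List.range (pyColsOf matrices)).map (fun _ => (0:Int)))) a b = 0 := by
      intro a b
      unfold cell
      simp only [List.getD_eq_getElem?_getD, List.getElem?_map]
      by_cases h : a < pyRowsOf matrices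
      · rw [List.getElem?_range h]
        simp only [Option.map_some, Option.getD_some]
        by_cases hb : b < pyColsOf matrices
        · rw [List.getElem?_map, List.getElem?_range hb]
          rfl
        · rw [show ((List.range (pyColsOf matrices)).map (fun _ => (0:Int)))[b]? = none from
            List.getElem?_eq_none (by simpa using Nat.le_of_not_lt hb)]
          rfl
      · rw [show (List.range (pyRowsOf matrices))[a]? = none from
            List.getElem?_eq_none (by simpa using Nat.le_of_not_lt h)]
        rfl
    have hcellR : ∀ a b, cell (matrices.foldl (fun g m => cmRows 0 m g)
        ((List.range (pyRowsOf matrices)).map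
          (fun _ => (List.range (pyColsOf matrices)).map (fun _ => (0:Int))))) a b =
        matrices.foldl (fun acc m => if a < m.length ∧ b < (m.getD a []).length
          then max acc ((m.getD a []).getD b 0) else acc) 0 := by
      intro a b
      rw [fold_cell (pyColsOf matrices) a b matrices _
        (fun m hmm => by simpa using rows_bound matrices m hmm)
        (fun m hmm row hrow => cols_bound matrices m hmm row hrow)
        (fun a' => by rw [hg0row]; split_ifs <;> simp)
        (fun a' ha' => by rw [hg0row, if_pos (by simpa using ha')])]
      rw [hcell0 a b]
    apply List.ext_getElem
    · rw [foldR_len]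
      simp
    · intro r h1 h2
      simp only [List.getElem_map, List.getElem_range]
      apply List.ext_getElem
      · rw [← List.getD_eq_getElem _ [] h1, foldR_rowlen, hg0row,
          if_pos (by rw [foldR_len] at h1; simpa using h1)]
        simp
      · intro c hc1 hc2
        rw [show (matrices.foldl (fun g m => cmRows 0 m g)
            ((List.range (pyRowsOf matrices)).map
              (fun _ => (List.range (pyColsOf matrices)).map (fun _ => (0:Int)))))[r][c] =
            cell (matrices.foldl (fun g m => cmRows 0 m g)
            ((List.range (pyRowsOf matrices)).map
              (fun _ => (List.range (pyColsOf matrices)).map (fun _ => (0:Int))))) r c by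
          unfold cell
          rw [List.getD_eq_getElem _ [] h1, List.getD_eq_getElem _ _ hc1]]
        rw [hcellR r c]
        simp only [List.getElem_map, List.getElem_range]
        rw [List.foldl_filterMap]
        apply List.foldl_ext
        intro acc m _
        split_ifs with h <;> rfl
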